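-- pv_equiv track=rewrite | github.com/mozilla/crash-stop-addon | crashstop/utils.py | get_channel_revision
-- ===== SOURCE A (Python) =====
-- def get_channel_revision(pairs):
--     """Get a map channel->revision
--     """
--     res = {}
--     for pair in pairs:
--         pair = pair.split('|')
--         if len(pair) < 2:
--             continue
--         repo, rev = pair
--         if repo in res:
--             res[repo].append(rev)
--         else:
--             res[repo] = [rev]
--
--     return res
-- ===== SOURCE B (Python) =====
-- def get_channel_revision(pairs):
--     """Get a map channel->revision"""
--     valid = [x for x in (p.split('|') for p in pairs) if len(x) >= 2]
--     channels = list(dict.fromkeys(x[0] for x in valid))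
--     return {ch: [x[1] for x in valid if x[0] == ch] for ch in channels}
-- ===== Notes on version B (the rewrite author's own statement) =====
-- stated objective: alternative
-- what changed: A builds the dict in one pass, mutating per-entry (append or create); B first splits everything and keeps the valid entries, lists the distinct channels with dict.fromkeys, then builds the result with one comprehension per channel.
import Mathlib
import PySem

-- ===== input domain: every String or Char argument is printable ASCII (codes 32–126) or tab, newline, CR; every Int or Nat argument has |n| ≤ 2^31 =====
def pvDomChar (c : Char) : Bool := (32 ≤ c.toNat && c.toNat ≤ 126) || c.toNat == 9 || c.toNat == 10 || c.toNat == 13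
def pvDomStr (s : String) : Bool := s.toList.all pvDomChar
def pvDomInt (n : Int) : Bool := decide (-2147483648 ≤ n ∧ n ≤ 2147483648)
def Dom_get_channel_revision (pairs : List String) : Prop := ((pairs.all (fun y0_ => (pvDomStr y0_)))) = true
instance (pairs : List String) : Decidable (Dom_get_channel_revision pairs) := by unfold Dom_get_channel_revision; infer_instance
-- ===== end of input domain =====

-- B groups with per-channel comprehensions over the pre-split valid entries (first-occurrence channel
-- order) instead of A's dict-mutating single pass; objective: alternative decomposition, same results.


-- ===== PORT A =====
-- literal port of A: a dict built by one pass; `pair.split('|')` is PySem.Str.split?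
-- (none is unreachable: the separator "|" is nonempty); the 3+-field unpack raises
-- ValueError in Python — that branch is excluded by Pre_ below.
def get_channel_revision (pairs : List String) : List (String × List String) :=
  (pairs.foldl (fun res pair =>
    match PySem.Str.split? pair "|" with
    | none => res            -- unreachable: "|" ≠ ""
    | some parts =>
      if parts.length < 2 then res
      else
        match parts with
        | [repo, rev] =>
            if res.contains repo then res.insert repo (res.getD repo [] ++ [rev])
            else res.insert repo [rev]
        | _ => res           -- 3+ fields: ValueError in Python, outside Pre_
  ) PySem.Dict.empty).items

-- ===== PORT B =====
-- literal port of Source B: split everything once, keep the valid entries, list the distinct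
-- channels (dict.fromkeys = PySem.List.dedup), then one comprehension per channel.
def get_channel_revision_alt (pairs : List String) : List (String × List String) :=
  let valid := (pairs.map (fun p => (PySem.Str.split? p "|").getD [])).filter (fun x => 2 ≤ x.length)
  let channels := PySem.List.dedup (valid.map (fun x => PySem.List.pyGetD x 0 ""))
  channels.map (fun ch => (ch,
    (valid.filter (fun x => PySem.List.pyGetD x 0 "" == ch)).map (fun x => PySem.List.pyGetD x 1 "")))

-- ===== PRECONDITION & SPEC =====
-- Pre_ excludes exactly the inputs where A raises ValueError: a string splitting into 3+
-- fields (two or more '|') makes `repo, rev = pair` fail.  Everywhere else A returns.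
def Pre_get_channel_revision (pairs : List String) : Prop :=
  ∀ p ∈ pairs, (PySem.Chars.splitOn p.toList ['|']).length ≤ 2
instance (pairs : List String) : Decidable (Pre_get_channel_revision pairs) := by
  unfold Pre_get_channel_revision; infer_instance

def pvWitness_get_channel_revision : List String :=
  ["release|abc", "beta|def", "release|ghi", "nosep", ""]

def Spec_get_channel_revision (pairs : List String) (out : List (String × List String)) : Prop := out = get_channel_revision_alt pairs
instance (pairs : List String) (out : List (String × List String)) : Decidable (Spec_get_channel_revision pairs out) := by unfold Spec_get_channel_revision; infer_instance

-- ===== CLAIM (what is proved, stated in full; the proofs are below) =====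
def Claim_equal_get_channel_revision : Prop := ∀ (pairs : List String), Dom_get_channel_revision pairs → Pre_get_channel_revision pairs → Spec_get_channel_revision pairs (get_channel_revision pairs)

-- ===== LEMMAS AND PROOFS =====

-- the valid (channel, revision) pairs, in order
def pvToKV (p : String) : Option (String × String) :=
  match (PySem.Str.split? p "|").getD [] with
  | [r, v] => some (r, v)
  | _ => none

lemma pv_split_eq (p : String) :
    PySem.Str.split? p "|" = some ((PySem.Chars.splitOn p.toList ['|']).map String.ofList) := by
  simp [PySem.Str.split?, PySem.Chars.split?]

-- A's per-string step on a 2-field string is a Dict.modify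
lemma pv_step_eq (d : PySem.Dict String (List String)) (k v : String) :
    (if d.contains k then d.insert k (d.getD k [] ++ [v]) else d.insert k [v])
      = d.modify k [] (· ++ [v]) := by
  unfold PySem.Dict.modify
  by_cases h : d.contains k = true
  · simp [h]
  · simp only [Bool.not_eq_true] at h
    simp [h, PySem.Dict.getD_of_not_contains _ _ h]

-- A's fold equals a modify-fold over the valid pairs
lemma pv_A_fold (pairs : List String) (h : Pre_get_channel_revision pairs)
    (d : PySem.Dict String (List String)) :
    pairs.foldl (fun res pair =>
      match PySem.Str.split? pair "|" with
      | none => res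
      | some parts =>
        if parts.length < 2 then res
        else
          match parts with
          | [repo, rev] =>
              if res.contains repo then res.insert repo (res.getD repo [] ++ [rev])
              else res.insert repo [rev]
          | _ => res) d
    = (pairs.filterMap pvToKV).foldl (fun d q => d.modify q.1 [] (· ++ [q.2])) d := by
  induction pairs generalizing d with
  | nil => rfl
  | cons p rest ih =>
    have hp : (PySem.Chars.splitOn p.toList ['|']).length ≤ 2 := h p (by simp)
    have hrest : Pre_get_channel_revision rest := fun q hq => h q (by simp [hq])
    simp only [List.foldl_cons, List.filterMap_cons]
    rw [pv_split_eq]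
    unfold pvToKV
    rw [pv_split_eq]
    generalize hl : (PySem.Chars.splitOn p.toList ['|']).map String.ofList = l
    have hl2 : l.length ≤ 2 := by rw [← hl]; simpa using hp
    match l, hl2 with
    | [], _ => simpa using ih hrest d
    | [a], _ => simpa using ih hrest d
    | [a, b], _ =>
      simp only [List.length_cons, List.length_nil, Option.getD_some]
      rw [if_neg (by omega), pv_step_eq]
      simp only [List.foldl_cons]
      exact ih hrest _

-- B's valid list is the valid pairs, re-listed as 2-element lists
lemma pv_B_valid (pairs : List String) (h : Pre_get_channel_revision pairs) :
    ((pairs.map (fun p => (PySem.Str.split? p "|").getD [])).filter (fun x => 2 ≤ x.length))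
    = (pairs.filterMap pvToKV).map (fun q => [q.1, q.2]) := by
  induction pairs with
  | nil => rfl
  | cons p rest ih =>
    have hp : (PySem.Chars.splitOn p.toList ['|']).length ≤ 2 := h p (by simp)
    have hrest : Pre_get_channel_revision rest := fun q hq => h q (by simp [hq])
    obtain ⟨l, hl⟩ : ∃ l, (PySem.Chars.splitOn p.toList ['|']).map String.ofList = l := ⟨_, rfl⟩
    have hsp : (PySem.Str.split? p "|").getD [] = l := by rw [pv_split_eq, hl]; rfl
    have hl2 : l.length ≤ 2 := by rw [← hl]; simpa using hp
    rcases l with _ | ⟨a, _ | ⟨b, _ | ⟨c, t⟩⟩⟩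
    · have hkv : pvToKV p = none := by simp [pvToKV, hsp]
      simp only [List.map_cons, List.filter_cons, List.filterMap_cons, hkv, hsp]
      simpa using ih hrest
    · have hkv : pvToKV p = none := by simp [pvToKV, hsp]
      simp only [List.map_cons, List.filter_cons, List.filterMap_cons, hkv, hsp]
      simpa using ih hrest
    · have hkv : pvToKV p = some (a, b) := by simp [pvToKV, hsp]
      simp only [List.map_cons, List.filter_cons, List.filterMap_cons, hkv, hsp]
      rw [if_pos (by simp)]
      simp [ih hrest]
    · simp at hl2

-- A's dict items, in closed form
lemma pv_A_items (kvs : List (String × String)) :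
    ((kvs.foldl (fun d q => d.modify q.1 [] (· ++ [q.2])) PySem.Dict.empty).items :
      List (String × List String))
    = (PySem.Set.ofList (kvs.map (fun q => q.1))).map
        (fun k => (k, (kvs.filter (fun q => q.1 == k)).map (fun q => q.2))) := by
  have hnd : (kvs.foldl (fun d q => d.modify q.1 [] (· ++ [q.2])) PySem.Dict.empty).keys.Nodup :=
    PySem.Dict.nodup_keys_foldl_modify_key kvs Prod.fst [] (fun d q => (· ++ [q.2])) PySem.Dict.empty
      (by simp)
  rw [PySem.Dict.items_eq_map_keys _ hnd []]
  have hkeys : (kvs.foldl (fun d q => d.modify q.1 [] (· ++ [q.2])) PySem.Dict.empty).keys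
      = PySem.Set.ofList (kvs.map (fun q => q.1)) := by
    rw [PySem.Dict.keys_foldl_modify_key kvs Prod.fst [] (fun d q => (· ++ [q.2]))]
    simp [PySem.Set.ofList_eq_foldl, PySem.Set.update, PySem.Dict.keys_empty]
  rw [hkeys]
  apply List.map_congr_left
  intro k hk
  rw [PySem.Dict.getD_foldl_modify_append]
  simp [PySem.Dict.getD_empty]

-- B's per-channel comprehensions over the re-listed pairs, in the same closed form
lemma pv_B_group (kvs : List (String × String)) :
    (PySem.List.dedup ((kvs.map (fun q => [q.1, q.2])).map (fun x => PySem.List.pyGetD x 0 ""))).map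
      (fun ch => (ch,
        ((kvs.map (fun q => [q.1, q.2])).filter (fun x => PySem.List.pyGetD x 0 "" == ch)).map
          (fun x => PySem.List.pyGetD x 1 "")))
    = (PySem.Set.ofList (kvs.map (fun q => q.1))).map
        (fun k => (k, (kvs.filter (fun q => q.1 == k)).map (fun q => q.2))) := by
  have h0 : ∀ q : String × String, PySem.List.pyGetD [q.1, q.2] 0 "" = q.1 := by
    intro q; simp [PySem.List.pyGetD_zero_cons]
  have h1 : ∀ q : String × String, PySem.List.pyGetD [q.1, q.2] 1 "" = q.2 := by
    intro q; rw [PySem.List.pyGetD_ofNat']; rfl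
  rw [PySem.List.dedup_eq_ofList, List.map_map]
  have hc0 : ((fun x => PySem.List.pyGetD x 0 "") ∘ fun q : String × String => [q.1, q.2])
      = fun q : String × String => q.1 := by funext q; simp [Function.comp, h0]
  rw [hc0]
  apply List.map_congr_left
  intro k hk
  rw [List.filter_map, List.map_map]
  have hf : ((fun x => PySem.List.pyGetD x 1 "") ∘ fun q : String × String => [q.1, q.2])
      = fun q : String × String => q.2 := by funext q; simp [Function.comp, h1]
  have hp : ((fun x => PySem.List.pyGetD x 0 "" == k) ∘ fun q : String × String => [q.1, q.2])
      = fun q : String × String => q.1 == k := by funext q; simp [Function.comp, h0]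
  rw [hf, hp]

-- ===== VERDICT (by name: the statement is the Claim_ definition above) =====
theorem get_channel_revision_spec : Claim_equal_get_channel_revision := by
  intro pairs _ hpre
  unfold Spec_get_channel_revision get_channel_revision get_channel_revision_alt
  rw [pv_A_fold pairs hpre, pv_B_valid pairs hpre, pv_A_items, pv_B_group]
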